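-- pv_equiv track=rewrite | github.com/lodomo/LeetCode | 3152_-_Special_Array_II/3152.py | isArraySpecial
-- ===== SOURCE A (Python) =====
-- class List(list):
--     pass
--
-- def isArraySpecial(nums: List[int], queries: List[List[int]]) -> List[bool]:
--     num_length = len(nums)
--     success = []
--     successes = 0
--     results = []
--
--     if num_length == 1:
--         for query in queries:
--             results.append(True)
--         return results
--
--     for i in range(num_length - 1):
--         if (nums[i] + nums[i + 1]) % 2 == 1:
--             successes += 1
--         success.append(successes)
--
--     for query in queries:
--         q0 = query[0]
--         q1 = query[1]
--
--         if q0 == q1: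
--             results.append(True)
--             continue
--
--         s1 = success[q1 - 1]
--         s2 = success[q0 - 1] if q0 > 0 else 0
--         results.append((q1 - q0) == (s1 - s2))
--
--     return results
-- ===== SOURCE B (Python) =====
-- def isArraySpecial(nums, queries):
--     if len(nums) == 1:
--         return [True] * len(queries)
--     # run-start array: start[i] = left edge of the maximal alternating run ending at i
--     start = []
--     cur = 0
--     for i in range(len(nums)):
--         if i > 0 and (nums[i - 1] + nums[i]) % 2 == 0:
--             cur = i
--         start.append(cur)
--     return [start[q[1]] <= q[0] for q in queries]
-- ===== Notes on version B (the rewrite author's own statement) =====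
-- stated objective: simpler
-- what changed: Replaces the prefix-count-of-alternating-pairs array plus per-query count comparison (with a q0==0 special case) by a run-start array where start[i] remembers the left edge of the maximal alternating run ending at i, so each query is a single comparison start[r] <= l; the trivial single-element array keeps its all-True early answer.
-- outside the precondition, e.g. on isArraySpecial([2, 2], [[1, 0]]): A returns [False], B returns [True]; on isArraySpecial([1, 2, 3], [[0, -1]]): A returns [False], B returns [True]; on isArraySpecial([1, 2], [[5, 5]]): A returns [True], B raises IndexError
import Mathlib
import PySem

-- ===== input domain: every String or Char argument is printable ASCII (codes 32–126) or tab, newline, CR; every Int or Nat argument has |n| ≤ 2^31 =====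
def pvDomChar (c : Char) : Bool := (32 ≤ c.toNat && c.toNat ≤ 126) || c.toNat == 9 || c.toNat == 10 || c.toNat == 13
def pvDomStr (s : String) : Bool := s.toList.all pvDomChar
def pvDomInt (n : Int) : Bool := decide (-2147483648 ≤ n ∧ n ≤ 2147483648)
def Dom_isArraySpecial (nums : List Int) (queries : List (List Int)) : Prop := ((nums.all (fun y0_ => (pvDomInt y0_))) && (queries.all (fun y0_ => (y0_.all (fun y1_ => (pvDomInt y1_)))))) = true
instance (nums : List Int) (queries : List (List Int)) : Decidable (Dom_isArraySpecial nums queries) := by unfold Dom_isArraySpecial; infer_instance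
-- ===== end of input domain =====

-- B replaces A's prefix-count array + per-query count comparison by a run-start
-- array (start[i] = left edge of the maximal alternating run ending at i), making
-- each query one comparison with no special cases; objective: simpler.

-- ===== PORT A =====
def isArraySpecial (nums : List Int) (queries : List (List Int)) : List Bool :=
  let num_length : Int := nums.length
  if num_length == 1 then
    queries.foldl (fun results _ => results ++ [true]) []
  else
    let p := (PySem.List.pyRange 0 (num_length - 1) 1).foldl
      (fun (st : List Int × Int) i =>
        let successes :=
          if PySem.Int.mod (PySem.List.pyGetD nums i 0 + PySem.List.pyGetD nums (i + 1) 0) 2 = 1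
          then st.2 + 1 else st.2
        (st.1 ++ [successes], successes)) ([], 0)
    let success := p.1
    queries.foldl (fun results query =>
      let q0 := PySem.List.pyGetD query 0 0
      let q1 := PySem.List.pyGetD query 1 0
      if q0 == q1 then results ++ [true]
      else
        let s1 := PySem.List.pyGetD success (q1 - 1) 0
        let s2 := if q0 > 0 then PySem.List.pyGetD success (q0 - 1) 0 else 0
        results ++ [q1 - q0 == s1 - s2]) []

-- ===== PORT B =====
def isArraySpecial_alt (nums : List Int) (queries : List (List Int)) : List Bool :=
  if nums.length == 1 then List.replicate queries.length true else
  let p := (PySem.List.pyRange 0 (nums.length : Int) 1).foldl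
    (fun (st : List Int × Int) i =>
      let cur :=
        if 0 < i ∧ PySem.Int.mod (PySem.List.pyGetD nums (i - 1) 0 + PySem.List.pyGetD nums i 0) 2 = 0
        then i else st.2
      (st.1 ++ [cur], cur)) ([], 0)
  let start := p.1
  queries.map (fun q =>
    decide (PySem.List.pyGetD start (PySem.List.pyGetD q 1 0) 0 ≤ PySem.List.pyGetD q 0 0))

-- ===== PRECONDITION & SPEC =====
-- Pre_ admits any queries when len(nums) == 1 (both programs answer all True without reading them)
-- and otherwise restricts queries to the problem's well-formed ranges (two endpoints, 0 ≤ l ≤ r < len(nums)).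
-- It excludes some inputs on which A still returns: reversed or negatively-indexed query ranges answered
-- through negative-index wraparound — unspecified corners whose values are artefacts of A's
-- implementation (B raises or answers from its own run-start array there).
def Pre_isArraySpecial (nums : List Int) (queries : List (List Int)) : Prop :=
  nums.length = 1 ∨
    ∀ q ∈ queries, 2 ≤ q.length ∧ 0 ≤ q.getD 0 0 ∧ q.getD 0 0 ≤ q.getD 1 0 ∧ q.getD 1 0 < (nums.length : Int)
instance (nums : List Int) (queries : List (List Int)) : Decidable (Pre_isArraySpecial nums queries) := by
  unfold Pre_isArraySpecial; infer_instance

def pvWitness_isArraySpecial : List Int × List (List Int) := ([1, 2, 3, 4, 4], [[0, 3], [2, 4], [1, 1]])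

def Spec_isArraySpecial (nums : List Int) (queries : List (List Int)) (out : List Bool) : Prop := out = isArraySpecial_alt nums queries
instance (nums : List Int) (queries : List (List Int)) (out : List Bool) : Decidable (Spec_isArraySpecial nums queries out) := by unfold Spec_isArraySpecial; infer_instance

-- ===== CLAIM (what is proved, stated in full; the proofs are below) =====
def Claim_equal_isArraySpecial : Prop := ∀ (nums : List Int) (queries : List (List Int)), Dom_isArraySpecial nums queries → Pre_isArraySpecial nums queries → Spec_isArraySpecial nums queries (isArraySpecial nums queries)

-- ===== LEMMAS AND PROOFS =====

-- pair (i, i+1) of nums alternates in parity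
def pvAlt (nums : List Int) (i : Nat) : Bool :=
  PySem.Int.mod (nums.getD i 0 + nums.getD (i + 1) 0) 2 = 1

-- prefix count of alternating pairs (A's "successes" after i iterations)
def pvS (nums : List Int) : Nat → Int
  | 0 => 0
  | k + 1 => pvS nums k + (if pvAlt nums k then 1 else 0)

-- run start (B's "cur" value at index i)
def pvR (nums : List Int) : Nat → Int
  | 0 => 0
  | k + 1 => if pvAlt nums k then pvR nums k else ((k : Int) + 1)

-- B's "cur" entering iteration i
def pvRL (nums : List Int) : Nat → Int
  | 0 => 0
  | k + 1 => pvR nums k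

theorem pvMod_two (x : Int) : PySem.Int.mod x 2 = 0 ∨ PySem.Int.mod x 2 = 1 := by
  rw [PySem.Int.mod_eq_emod_of_pos (by omega : (0:Int) < 2)]; omega

theorem pvAlt_of_mod_zero (nums : List Int) (k : Nat)
    (hm : PySem.Int.mod (nums.getD k 0 + nums.getD (k + 1) 0) 2 = 0) :
    pvAlt nums k = false := by
  unfold pvAlt; rw [hm]; decide

theorem pvAlt_of_mod_one (nums : List Int) (k : Nat)
    (hm : PySem.Int.mod (nums.getD k 0 + nums.getD (k + 1) 0) 2 = 1) :
    pvAlt nums k = true := by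
  unfold pvAlt; rw [hm]; decide

theorem pvR_bounds (nums : List Int) (m : Nat) : 0 ≤ pvR nums m ∧ pvR nums m ≤ (m : Int) := by
  induction m with
  | zero => simp [pvR]
  | succ k ih => simp only [pvR]; split <;> push_cast <;> omega

theorem pvS_bounds (nums : List Int) (a b : Nat) (h : a ≤ b) :
    0 ≤ pvS nums b - pvS nums a ∧ pvS nums b - pvS nums a ≤ (b : Int) - (a : Int) := by
  induction b with
  | zero => interval_cases a; simp
  | succ k ih =>
    rcases Nat.lt_or_ge a (k + 1) with h' | h'
    · have := ih (by omega)
      simp only [pvS]; split <;> push_cast <;> omega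
    · have : a = k + 1 := by omega
      subst this; simp

theorem pvS_char (nums : List Int) (a b : Nat) (h : a ≤ b) :
    (pvS nums b - pvS nums a = (b : Int) - (a : Int)) ↔
      (∀ i, a ≤ i → i < b → pvAlt nums i = true) := by
  induction b with
  | zero => interval_cases a; simp
  | succ k ih =>
    rcases Nat.lt_or_ge a (k + 1) with h' | h'
    · have hb := pvS_bounds nums a k (by omega)
      have ihk := ih (by omega)
      constructor
      · intro he
        by_cases halt : pvAlt nums k = true
        · have hk : pvS nums k - pvS nums a = (k : Int) - (a : Int) := by
            simp only [pvS, if_pos halt] at he; push_cast at he; omega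
          intro i hai hik
          rcases Nat.lt_or_ge i k with h2 | h2
          · exact ihk.mp hk i hai h2
          · have : i = k := by omega
            subst this; exact halt
        · exfalso
          simp only [pvS, if_neg halt] at he; push_cast at he; omega
      · intro hall
        have halt : pvAlt nums k = true := hall k (by omega) (by omega)
        have : pvS nums k - pvS nums a = (k : Int) - (a : Int) :=
          ihk.mpr (fun i hai hik => hall i hai (by omega))
        simp only [pvS, if_pos halt]; push_cast; omega
    · have : a = k + 1 := by omega
      subst this
      constructor
      · intro _ i hai hik; omega
      · intro _; simp

theorem pvR_char (nums : List Int) (a b : Nat) (h : a ≤ b) :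
    (pvR nums b ≤ (a : Int)) ↔ (∀ i, a ≤ i → i < b → pvAlt nums i = true) := by
  induction b with
  | zero => interval_cases a; simp [pvR]
  | succ k ih =>
    rcases Nat.lt_or_ge a (k + 1) with h' | h'
    · have ihk := ih (by omega)
      by_cases halt : pvAlt nums k = true
      · simp only [pvR, if_pos halt]
        rw [ihk]
        constructor
        · intro hall i hai hik
          rcases Nat.lt_or_ge i k with hik' | hik'
          · exact hall i hai hik'
          · have : i = k := by omega
            subst this; exact halt
        · intro hall i hai hik; exact hall i hai (by omega)
      · simp only [pvR, if_neg halt]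
        constructor
        · intro hle; exfalso; push_cast at hle; omega
        · intro hall; exact absurd (hall k (by omega) (by omega)) halt
    · have : a = k + 1 := by omega
      subst this
      constructor
      · intro _ i hai hik; omega
      · intro _
        have := pvR_bounds nums (k + 1)
        push_cast at this ⊢; omega

-- A's success-building fold
theorem pvA_fold (nums : List Int) (m : Nat) :
    (PySem.List.pyRange 0 (m : Int) 1).foldl
      (fun (st : List Int × Int) i =>
        let successes :=
          if PySem.Int.mod (PySem.List.pyGetD nums i 0 + PySem.List.pyGetD nums (i + 1) 0) 2 = 1
          then st.2 + 1 else st.2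
        (st.1 ++ [successes], successes)) ([], 0)
    = ((List.range m).map (fun j => pvS nums (j + 1)), pvS nums m) := by
  induction m with
  | zero => simp [PySem.List.pyRange_one_eq_nil, pvS]
  | succ k ih =>
    have hsplit : PySem.List.pyRange 0 ((k + 1 : Nat) : Int) 1
        = PySem.List.pyRange 0 (k : Int) 1 ++ [(k : Int)] := by
      push_cast
      exact PySem.List.pyRange_one_succ_right (by positivity)
    rw [hsplit, List.foldl_append, ih]
    have hg1 : PySem.List.pyGetD nums ((k : Int)) 0 = nums.getD k 0 :=
      PySem.List.pyGetD_natCast nums k 0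
    have hg2 : PySem.List.pyGetD nums ((k : Int) + 1) 0 = nums.getD (k + 1) 0 := by
      rw [show ((k : Int) + 1) = ((k + 1 : Nat) : Int) by push_cast; ring]
      exact PySem.List.pyGetD_natCast nums (k + 1) 0
    have hval : (if PySem.Int.mod (nums.getD k 0 + nums.getD (k + 1) 0) 2 = 1
        then pvS nums k + 1 else pvS nums k) = pvS nums (k + 1) := by
      rcases pvMod_two (nums.getD k 0 + nums.getD (k + 1) 0) with hm | hm
      · rw [if_neg (by rw [hm]; decide), pvS, pvAlt_of_mod_zero nums k hm]; simp
      · rw [if_pos hm, pvS, pvAlt_of_mod_one nums k hm]; simp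
    simp only [List.foldl_cons, List.foldl_nil, hg1, hg2, hval, List.range_succ,
      List.map_append, List.map_cons, List.map_nil]

-- B's start-building fold
theorem pvB_fold (nums : List Int) (m : Nat) :
    (PySem.List.pyRange 0 (m : Int) 1).foldl
      (fun (st : List Int × Int) i =>
        let cur :=
          if 0 < i ∧ PySem.Int.mod (PySem.List.pyGetD nums (i - 1) 0 + PySem.List.pyGetD nums i 0) 2 = 0
          then i else st.2
        (st.1 ++ [cur], cur)) ([], 0)
    = ((List.range m).map (pvR nums), pvRL nums m) := by
  induction m with
  | zero => simp [PySem.List.pyRange_one_eq_nil, pvRL]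
  | succ k ih =>
    have hsplit : PySem.List.pyRange 0 ((k + 1 : Nat) : Int) 1
        = PySem.List.pyRange 0 (k : Int) 1 ++ [(k : Int)] := by
      push_cast
      exact PySem.List.pyRange_one_succ_right (by positivity)
    rw [hsplit, List.foldl_append, ih]
    have hcur : (if 0 < (k : Int) ∧
        PySem.Int.mod (PySem.List.pyGetD nums ((k : Int) - 1) 0 + PySem.List.pyGetD nums ((k : Int)) 0) 2 = 0
        then (k : Int) else pvRL nums k) = pvR nums k := by
      cases k with
      | zero => simp [pvRL, pvR]
      | succ j =>
        have hg1 : PySem.List.pyGetD nums (((j + 1 : Nat) : Int) - 1) 0 = nums.getD j 0 := by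
          rw [show (((j + 1 : Nat) : Int) - 1) = ((j : Nat) : Int) by push_cast; ring]
          exact PySem.List.pyGetD_natCast nums j 0
        have hg2 : PySem.List.pyGetD nums (((j + 1 : Nat) : Int)) 0 = nums.getD (j + 1) 0 :=
          PySem.List.pyGetD_natCast nums (j + 1) 0
        rw [hg1, hg2]
        rcases pvMod_two (nums.getD j 0 + nums.getD (j + 1) 0) with hm | hm
        · rw [if_pos ⟨by positivity, hm⟩]
          show _ = pvR nums (j + 1)
          rw [pvR, pvAlt_of_mod_zero nums j hm]
          push_cast; simp
        · rw [if_neg (by rintro ⟨-, h⟩; rw [hm] at h; exact absurd h (by decide))]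
          show pvR nums j = pvR nums (j + 1)
          rw [pvR, pvAlt_of_mod_one nums j hm]
          simp
    simp only [List.foldl_cons, List.foldl_nil, hcur, List.range_succ, List.map_append,
      List.map_cons, List.map_nil]
    show (_, pvR nums k) = (_, pvRL nums (k + 1))
    rfl

theorem pvGet_map_range (f : Nat → Int) (n : Nat) (r : Int) (h0 : 0 ≤ r) (h1 : r < (n : Int)) :
    PySem.List.pyGetD ((List.range n).map f) r 0 = f r.toNat := by
  rw [PySem.List.pyGetD_eq_getElem _ _ h0 (by simpa using h1)]
  simp

theorem pvGet_one (q : List Int) : PySem.List.pyGetD q 1 0 = q.getD 1 0 := by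
  rw [show (1 : Int) = ((1 : Nat) : Int) by norm_num]
  exact PySem.List.pyGetD_natCast q 1 0

theorem pvB_eq (nums : List Int) (queries : List (List Int)) (hn : nums.length ≠ 1) :
    isArraySpecial_alt nums queries
      = queries.map (fun q =>
          decide (PySem.List.pyGetD ((List.range nums.length).map (pvR nums)) (q.getD 1 0) 0
            ≤ q.getD 0 0)) := by
  unfold isArraySpecial_alt
  rw [if_neg (by simpa using hn), pvB_fold nums nums.length]
  simp only [PySem.List.pyGetD_zero, pvGet_one]

-- A's per-query answer
def pvQA (success : List Int) (query : List Int) : Bool :=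
  if PySem.List.pyGetD query 0 0 == PySem.List.pyGetD query 1 0 then true
  else
    PySem.List.pyGetD query 1 0 - PySem.List.pyGetD query 0 0 ==
      PySem.List.pyGetD success (PySem.List.pyGetD query 1 0 - 1) 0 -
        if PySem.List.pyGetD query 0 0 > 0
        then PySem.List.pyGetD success (PySem.List.pyGetD query 0 0 - 1) 0 else 0

theorem pvFoldl_true {α : Type} (xs : List α) (acc : List Bool) :
    xs.foldl (fun res _ => res ++ [true]) acc = acc ++ xs.map (fun _ => true) := by
  induction xs generalizing acc with
  | nil => simp
  | cons y ys ih => simp [ih]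

theorem pvA_queries (success : List Int) (queries : List (List Int)) (acc : List Bool) :
    queries.foldl (fun results query =>
      if PySem.List.pyGetD query 0 0 == PySem.List.pyGetD query 1 0 then results ++ [true]
      else
        results ++ [PySem.List.pyGetD query 1 0 - PySem.List.pyGetD query 0 0 ==
          PySem.List.pyGetD success (PySem.List.pyGetD query 1 0 - 1) 0 -
            if PySem.List.pyGetD query 0 0 > 0
            then PySem.List.pyGetD success (PySem.List.pyGetD query 0 0 - 1) 0 else 0]) acc
    = acc ++ queries.map (pvQA success) := by
  induction queries generalizing acc with
  | nil => simp
  | cons q qs ih =>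
    simp only [List.foldl_cons, List.map_cons]
    rw [ih]
    by_cases h : (PySem.List.pyGetD q 0 0 == PySem.List.pyGetD q 1 0) = true
    · rw [if_pos h]; simp [pvQA, h]
    · rw [if_neg h]; simp [pvQA, h]

theorem isArraySpecial_spec : Claim_equal_isArraySpecial := by
  intro nums queries _ hpre
  show isArraySpecial nums queries = isArraySpecial_alt nums queries
  by_cases hn1 : nums.length = 1
  · simp only [isArraySpecial, isArraySpecial_alt]
    rw [if_pos (by simp [hn1]), if_pos (by simp [hn1])]
    rw [pvFoldl_true, List.nil_append]
    simp
  · have hpre' := hpre.resolve_left hn1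
    rw [pvB_eq nums queries hn1]
    simp only [isArraySpecial]
    rw [if_neg (by simpa using hn1)]
    rcases Nat.eq_zero_or_pos nums.length with hn0 | hposn
    · cases queries with
      | nil => simp
      | cons q qs =>
        exfalso
        have := hpre' q (List.mem_cons_self)
        rw [hn0] at this
        omega
    · have hcast : (nums.length : Int) - 1 = ((nums.length - 1 : Nat) : Int) := by omega
      rw [hcast, pvA_fold, pvA_queries, List.nil_append]
      refine List.map_congr_left ?_
      intro q hq
      obtain ⟨hlen, h0, h01, h1n⟩ := hpre' q hq
      simp only [pvQA, PySem.List.pyGetD_zero, pvGet_one]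
      by_cases heq : q.getD 0 0 = q.getD 1 0
      · rw [if_pos (by rw [heq, beq_self_eq_true])]
        rw [pvGet_map_range (pvR nums) nums.length _ (by omega) (by omega)]
        have hb := pvR_bounds nums (q.getD 1 0).toNat
        have hrt : ((q.getD 1 0).toNat : Int) = q.getD 1 0 := Int.toNat_of_nonneg (by omega)
        exact (decide_eq_true (by omega)).symm
      · rw [if_neg (by simpa using heq)]
        have hlr : q.getD 0 0 < q.getD 1 0 := lt_of_le_of_ne h01 heq
        rw [pvGet_map_range (fun j => pvS nums (j + 1)) (nums.length - 1) (q.getD 1 0 - 1)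
          (by omega) (by omega)]
        rw [pvGet_map_range (pvR nums) nums.length (q.getD 1 0) (by omega) (by omega)]
        have hs2 : (if q.getD 0 0 > 0 then
            PySem.List.pyGetD ((List.range (nums.length - 1)).map (fun j => pvS nums (j + 1)))
              (q.getD 0 0 - 1) 0 else 0) = pvS nums (q.getD 0 0).toNat := by
          by_cases hl0 : q.getD 0 0 > 0
          · rw [if_pos hl0, pvGet_map_range (fun j => pvS nums (j + 1)) (nums.length - 1)
              (q.getD 0 0 - 1) (by omega) (by omega)]
            congr 1
            omega
          · rw [if_neg hl0]
            have hz : q.getD 0 0 = 0 := by omega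
            rw [hz]
            simp [pvS]
        rw [hs2]
        have hidx : (q.getD 1 0 - 1).toNat + 1 = (q.getD 1 0).toNat := by omega
        rw [hidx]
        have key := (pvS_char nums (q.getD 0 0).toNat (q.getD 1 0).toNat (by omega)).trans
          ((pvR_char nums (q.getD 0 0).toNat (q.getD 1 0).toNat (by omega)).symm)
        apply Bool.eq_iff_iff.mpr
        simp only [beq_iff_eq, decide_eq_true_eq]
        have hrt : ((q.getD 1 0).toNat : Int) = q.getD 1 0 := Int.toNat_of_nonneg (by omega)
        have hlt : ((q.getD 0 0).toNat : Int) = q.getD 0 0 := Int.toNat_of_nonneg (by omega)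
        rw [hrt, hlt] at key
        omega
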